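-- pv_equiv track=rewrite | github.com/smartinsert/CodingProblem | directi/pairs_in_an_array_divisible_by_k.py | is_pairable
-- ===== SOURCE A (Python) =====
-- def is_pairable(array, k):
--     mod_k = [0] * k
--     for n in array:
--         mod_k[n % k] += 1
--         mod_k[-n % k] -= 1
--
--         if n % k == -n % k:
--             mod_k[n % k] ^= 1
--
--     return not any(mod_k)
-- ===== SOURCE B (Python) =====
-- def is_pairable(array, k):
--     count = [0] * k
--     for n in array:
--         count[n % k] += 1
--     for r in range(k):
--         if (k - r) % k == r:
--             if count[r] % 2:
--                 return False
--         elif count[r] != count[(k - r) % k]: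
--             return False
--     return True
-- ===== Notes on version B (the rewrite author's own statement) =====
-- stated objective: simpler
-- what changed: B replaces A's in-place cancellation (+1/-1) with XOR parity trick by a plain residue-frequency count followed by a symmetric check count[r] == count[(k-r)%k] (even count on self-paired residues), doing one list update per element instead of A's two-to-three.
import Mathlib
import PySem

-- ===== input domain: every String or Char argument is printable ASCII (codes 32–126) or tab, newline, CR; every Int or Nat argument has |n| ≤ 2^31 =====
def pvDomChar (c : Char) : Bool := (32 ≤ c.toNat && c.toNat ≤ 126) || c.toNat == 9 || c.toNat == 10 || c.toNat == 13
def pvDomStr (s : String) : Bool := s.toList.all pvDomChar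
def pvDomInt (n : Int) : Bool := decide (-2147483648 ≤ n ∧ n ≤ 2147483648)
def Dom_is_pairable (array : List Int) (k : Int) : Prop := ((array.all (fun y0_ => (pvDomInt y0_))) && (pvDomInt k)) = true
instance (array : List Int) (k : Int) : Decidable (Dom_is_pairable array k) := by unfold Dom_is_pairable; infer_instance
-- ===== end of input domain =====

-- B replaces A's in-place cancellation/XOR trick with a residue-count pass followed by a
-- symmetric-residue check (objective: simpler/alternative, same O(n + k) cost).

-- ===== PORT A =====
-- one loop iteration of A: mod_k[n % k] += 1; mod_k[-n % k] -= 1; if n % k == -n % k: mod_k[n % k] ^= 1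
-- (the indices n % k, -n % k lie in [0, k) whenever 0 < k — the case Pre_ admits — so .toNat indexing is exact there)
def pvStepA (k : Int) (s : List Int) (n : Int) : List Int :=
  let r1 := PySem.Int.mod n k
  let r2 := PySem.Int.mod (-n) k
  let s1 := s.set r1.toNat (s.getD r1.toNat 0 + 1)
  let s2 := s1.set r2.toNat (s1.getD r2.toNat 0 - 1)
  if r1 = r2 then s2.set r1.toNat (PySem.Int.bxor (s2.getD r1.toNat 0) 1) else s2

def is_pairable (array : List Int) (k : Int) : Bool :=
  let mod_k := array.foldl (pvStepA k) (List.replicate k.toNat 0)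
  !(mod_k.any (fun v => v != 0))

-- ===== PORT B =====
def pvStepB (k : Int) (s : List Int) (n : Int) : List Int :=
  let r := PySem.Int.mod n k
  s.set r.toNat (s.getD r.toNat 0 + 1)

def is_pairable_alt (array : List Int) (k : Int) : Bool :=
  let count := array.foldl (pvStepB k) (List.replicate k.toNat 0)
  (PySem.List.pyRange 0 k 1).all (fun r =>
    if PySem.Int.mod (k - r) k = r then PySem.Int.mod (count.getD r.toNat 0) 2 == 0
    else count.getD r.toNat 0 == count.getD (PySem.Int.mod (k - r) k).toNat 0)

-- ===== PRECONDITION & SPEC =====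
-- Pre_ excludes exactly the inputs on which Python A raises: k ≤ 0 with a nonempty array
-- (k = 0: ZeroDivisionError from n % k; k < 0: IndexError on the empty [0]*k list).
def Pre_is_pairable (array : List Int) (k : Int) : Prop := 0 < k ∨ array = []
instance (array : List Int) (k : Int) : Decidable (Pre_is_pairable array k) := by unfold Pre_is_pairable; infer_instance
def pvWitness_is_pairable : List Int × Int := ([1, 5], 6)
def Spec_is_pairable (array : List Int) (k : Int) (out : Bool) : Prop := out = is_pairable_alt array k
instance (array : List Int) (k : Int) (out : Bool) : Decidable (Spec_is_pairable array k out) := by unfold Spec_is_pairable; infer_instance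

-- ===== CLAIM (what is proved, stated in full; the proofs are below) =====
def Claim_equal_is_pairable : Prop := ∀ (array : List Int) (k : Int), Dom_is_pairable array k → Pre_is_pairable array k → Spec_is_pairable array k (is_pairable array k)

-- ===== LEMMAS AND PROOFS =====

-- number of elements of xs whose Python residue mod k is r
def pvCnt (k : Int) (xs : List Int) (r : Int) : Int := (xs.countP (fun n => PySem.Int.mod n k == r) : Int)
-- the residue that pairs with r to a sum divisible by k
def pvPair (k r : Int) : Int := PySem.Int.mod (k - r) k
-- closed form of A's cell r after processing xs
def pvExpA (k : Int) (xs : List Int) (r : Int) : Int :=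
  if pvPair k r = r then (pvCnt k xs r) % 2 else pvCnt k xs r - pvCnt k xs (pvPair k r)
def pvStateA (k : Int) (xs : List Int) : List Int := (List.range k.toNat).map (fun r : Nat => pvExpA k xs (r : Int))
def pvCountL (k : Int) (xs : List Int) : List Int := (List.range k.toNat).map (fun r : Nat => pvCnt k xs (r : Int))

lemma pvCnt_append (k : Int) (xs : List Int) (n r : Int) :
    pvCnt k (xs ++ [n]) r = pvCnt k xs r + (if PySem.Int.mod n k = r then 1 else 0) := by
  simp only [pvCnt, List.countP_append, List.countP_cons, List.countP_nil]
  push_cast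
  split_ifs <;> simp_all

lemma pv_emod_pair (n k : Int) : (k - n % k) % k = (-n) % k := by
  have h : k - n % k = -n + k * (1 + n / k) := by rw [Int.emod_def]; ring
  rw [h, Int.add_mul_emod_self_left]

lemma pvPair_mod (k n : Int) (hk : 0 < k) :
    pvPair k (PySem.Int.mod n k) = PySem.Int.mod (-n) k := by
  simp only [pvPair, PySem.Int.mod_eq_emod_of_pos hk]
  exact pv_emod_pair n k

lemma pvMod_self (k r : Int) (hk : 0 < k) (h0 : 0 ≤ r) (h1 : r < k) :
    PySem.Int.mod r k = r := by
  rw [PySem.Int.mod_eq_emod_of_pos hk, Int.emod_eq_of_lt h0 h1]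

lemma pvPair_pair (k r : Int) (hk : 0 < k) (h0 : 0 ≤ r) (h1 : r < k) :
    pvPair k (pvPair k r) = r := by
  have h2 : pvPair k r = PySem.Int.mod (-r) k := by
    rw [← pvMod_self k r hk h0 h1]
    rw [pvPair_mod k r hk]
    rw [pvMod_self k r hk h0 h1]
  rw [h2, pvPair_mod k (-r) hk, neg_neg, pvMod_self k r hk h0 h1]

lemma pvPair_nonneg (k r : Int) (hk : 0 < k) : 0 ≤ pvPair k r := PySem.Int.mod_nonneg _ hk
lemma pvPair_lt (k r : Int) (hk : 0 < k) : pvPair k r < k := PySem.Int.mod_lt _ hk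

lemma pv_getD_map_range (K i : Nat) (f : Nat → Int) (h : i < K) :
    ((List.range K).map f).getD i 0 = f i := by
  rw [List.getD_eq_getElem?_getD, List.getElem?_map]
  simp [h]

lemma pv_set_map_range (K a : Nat) (f : Nat → Int) (v : Int) :
    ((List.range K).map f).set a v = (List.range K).map (fun i => if i = a then v else f i) := by
  apply List.ext_getElem
  · simp
  · intro i h1 h2
    simp only [List.getElem_set, List.getElem_map, List.getElem_range]
    split_ifs with h3 h4 h4
    · rfl
    · exact absurd h3.symm h4
    · exact absurd h4.symm h3
    · rfl

lemma pvXor_mod_two (c : Int) :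
    PySem.Int.bxor (c % 2) 1 = (c + 1) % 2 := by
  rcases Int.emod_two_eq c with h | h <;> rw [h]
  · have h2 : (c + 1) % 2 = 1 := by omega
    rw [h2]; decide
  · have h2 : (c + 1) % 2 = 0 := by omega
    rw [h2]; decide

lemma pvExpA_congr (k : Int) (ys xs : List Int) (r : Int)
    (h1 : pvCnt k ys r = pvCnt k xs r) (h2 : pvCnt k ys (pvPair k r) = pvCnt k xs (pvPair k r)) :
    pvExpA k ys r = pvExpA k xs r := by
  unfold pvExpA
  rw [h1, h2]

-- the step lemma for A: one iteration of A's loop updates the closed-form state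
lemma pvStepA_state (k : Int) (hk : 0 < k) (xs : List Int) (n : Int) :
    pvStepA k (pvStateA k xs) n = pvStateA k (xs ++ [n]) := by
  simp only [pvStepA, pvStateA]
  have hcnt : ∀ r : Int, pvCnt k (xs ++ [n]) r = pvCnt k xs r + (if PySem.Int.mod n k = r then 1 else 0) := pvCnt_append k xs n
  have hpair1 : pvPair k (PySem.Int.mod n k) = PySem.Int.mod (-n) k := pvPair_mod k n hk
  have h10 : 0 ≤ PySem.Int.mod n k := PySem.Int.mod_nonneg _ hk
  have h11 : PySem.Int.mod n k < k := PySem.Int.mod_lt _ hk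
  have h20 : 0 ≤ PySem.Int.mod (-n) k := PySem.Int.mod_nonneg _ hk
  have h21 : PySem.Int.mod (-n) k < k := PySem.Int.mod_lt _ hk
  revert hcnt hpair1 h10 h11 h20 h21
  generalize PySem.Int.mod n k = r1
  generalize PySem.Int.mod (-n) k = r2
  intro hcnt hpair1 h10 h11 h20 h21
  have hpair2 : pvPair k r2 = r1 := by rw [← hpair1, pvPair_pair k r1 hk h10 h11]
  have ha1K : r1.toNat < k.toNat := by omega
  have ha2K : r2.toNat < k.toNat := by omega
  have hc1 : (r1.toNat : Int) = r1 := Int.toNat_of_nonneg h10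
  have hc2 : (r2.toNat : Int) = r2 := Int.toNat_of_nonneg h20
  by_cases hself : r1 = r2
  · subst hself
    rw [if_pos rfl]
    rw [pv_getD_map_range _ _ _ ha1K, pv_set_map_range,
        pv_getD_map_range _ _ _ ha1K, if_pos rfl, pv_set_map_range,
        pv_getD_map_range _ _ _ ha1K, if_pos rfl, pv_set_map_range]
    apply List.map_congr_left
    intro i hi
    rw [List.mem_range] at hi
    have hi0 : (0:Int) ≤ (i:Int) := by positivity
    have hi1 : (i:Int) < k := by omega
    by_cases hia : i = r1.toNat
    · subst hia
      rw [if_pos rfl, hc1]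
      unfold pvExpA
      rw [if_pos hpair1, if_pos hpair1, hcnt, if_pos rfl]
      rw [show pvCnt k xs r1 % 2 + 1 - 1 = pvCnt k xs r1 % 2 by ring, pvXor_mod_two]
    · rw [if_neg hia, if_neg hia, if_neg hia]
      have hir1 : (i : Int) ≠ r1 := by omega
      have hipair : pvPair k i ≠ r1 := by
        intro hcontra
        have h := congrArg (pvPair k) hcontra
        rw [pvPair_pair k _ hk hi0 hi1, hpair1] at h
        exact hir1 h
      exact (pvExpA_congr k (xs ++ [n]) xs (i : Int)
        (by rw [hcnt (i : Int), if_neg (fun h => hir1 h.symm)]; ring)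
        (by rw [hcnt (pvPair k (i : Int)), if_neg (fun h => hipair h.symm)]; ring)).symm
  · rw [if_neg hself]
    have ha12 : r1.toNat ≠ r2.toNat := by omega
    rw [pv_getD_map_range _ _ _ ha1K, pv_set_map_range,
        pv_getD_map_range _ _ _ ha2K, if_neg (by omega), pv_set_map_range]
    apply List.map_congr_left
    intro i hi
    rw [List.mem_range] at hi
    have hi0 : (0:Int) ≤ (i:Int) := by positivity
    have hi1 : (i:Int) < k := by omega
    have hns1 : ¬ pvPair k r1 = r1 := by rw [hpair1]; exact fun h => hself h.symm
    have hns2 : ¬ pvPair k r2 = r2 := by rw [hpair2]; exact hself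
    by_cases hia2 : i = r2.toNat
    · subst hia2
      rw [if_pos rfl, hc2]
      unfold pvExpA
      rw [if_neg hns2, if_neg hns2, hpair2, hcnt r2, if_neg hself, hcnt r1, if_pos rfl]
      ring
    · rw [if_neg hia2]
      by_cases hia1 : i = r1.toNat
      · subst hia1
        rw [if_pos rfl, hc1]
        unfold pvExpA
        rw [if_neg hns1, if_neg hns1, hpair1, hcnt r1, if_pos rfl, hcnt r2, if_neg hself]
        ring
      · rw [if_neg hia1]
        have hir1 : (i : Int) ≠ r1 := by omega
        have hir2 : (i : Int) ≠ r2 := by omega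
        have hipair : pvPair k i ≠ r1 := by
          intro hcontra
          have h := congrArg (pvPair k) hcontra
          rw [pvPair_pair k _ hk hi0 hi1, hpair1] at h
          exact hir2 h
        exact (pvExpA_congr k (xs ++ [n]) xs (i : Int)
          (by rw [hcnt (i : Int), if_neg (fun h => hir1 h.symm)]; ring)
          (by rw [hcnt (pvPair k (i : Int)), if_neg (fun h => hipair h.symm)]; ring)).symm

lemma pvFoldA (k : Int) (hk : 0 < k) (ys : List Int) : ∀ (xs : List Int),
    ys.foldl (pvStepA k) (pvStateA k xs) = pvStateA k (xs ++ ys) := by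
  induction ys with
  | nil => intro xs; simp
  | cons n ys ih =>
      intro xs
      rw [List.foldl_cons, pvStepA_state k hk xs n, ih (xs ++ [n])]
      simp

lemma pvStateA_nil (k : Int) : pvStateA k [] = List.replicate k.toNat 0 := by
  apply List.ext_getElem
  · simp [pvStateA]
  · intro i h1 h2
    simp [pvStateA, pvExpA, pvCnt]

lemma pvFoldA_repl (k : Int) (hk : 0 < k) (array : List Int) :
    array.foldl (pvStepA k) (List.replicate k.toNat 0) = pvStateA k array := by
  rw [← pvStateA_nil, pvFoldA k hk array []]
  simp

lemma pvCountL_getD (k : Int) (xs : List Int) (r : Int) (h0 : 0 ≤ r) (h1 : r < k) :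
    (pvCountL k xs).getD r.toNat 0 = pvCnt k xs r := by
  have hi : r.toNat < k.toNat := by omega
  rw [pvCountL, pv_getD_map_range _ _ _ hi, Int.toNat_of_nonneg h0]

lemma pvStepB_count (k : Int) (hk : 0 < k) (xs : List Int) (n : Int) :
    pvStepB k (pvCountL k xs) n = pvCountL k (xs ++ [n]) := by
  have h10 : 0 ≤ PySem.Int.mod n k := PySem.Int.mod_nonneg _ hk
  have h11 : PySem.Int.mod n k < k := PySem.Int.mod_lt _ hk
  have ha1K : (PySem.Int.mod n k).toNat < k.toNat := by omega
  have hc1 : ((PySem.Int.mod n k).toNat : Int) = PySem.Int.mod n k := Int.toNat_of_nonneg h10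
  simp only [pvStepB, pvCountL]
  rw [pv_getD_map_range _ _ _ ha1K, pv_set_map_range]
  apply List.map_congr_left
  intro i hi
  rw [List.mem_range] at hi
  by_cases hia : i = (PySem.Int.mod n k).toNat
  · rw [if_pos hia]
    subst hia
    rw [pvCnt_append, hc1, if_pos rfl]
  · rw [if_neg hia]
    rw [pvCnt_append, if_neg (by omega)]
    ring

lemma pvFoldB (k : Int) (hk : 0 < k) (ys : List Int) : ∀ (xs : List Int),
    ys.foldl (pvStepB k) (pvCountL k xs) = pvCountL k (xs ++ ys) := by
  induction ys with
  | nil => intro xs; simp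
  | cons n ys ih =>
      intro xs
      rw [List.foldl_cons, pvStepB_count k hk xs n, ih (xs ++ [n])]
      simp

lemma pvCountL_nil (k : Int) : pvCountL k [] = List.replicate k.toNat 0 := by
  apply List.ext_getElem
  · simp [pvCountL]
  · intro i h1 h2
    simp [pvCountL, pvCnt]

lemma pvFoldB_repl (k : Int) (hk : 0 < k) (array : List Int) :
    array.foldl (pvStepB k) (List.replicate k.toNat 0) = pvCountL k array := by
  rw [← pvCountL_nil, pvFoldB k hk array []]
  simp

-- ===== VERDICT (by name: the statement is the Claim_ definition above) =====
theorem is_pairable_spec : Claim_equal_is_pairable := by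
  intro array k _ hpre
  unfold Spec_is_pairable is_pairable is_pairable_alt
  by_cases hk : 0 < k
  · simp only [pvFoldA_repl k hk array, pvFoldB_repl k hk array]
    rw [Bool.eq_iff_iff]
    simp only [Bool.not_eq_true', Bool.not_eq_true, List.any_eq_false, List.all_eq_true]
    constructor
    · intro h r hr
      rw [PySem.List.mem_pyRange_one] at hr
      obtain ⟨hr0, hr1⟩ := hr
      have hmem : pvExpA k array r ∈ pvStateA k array := by
        rw [pvStateA]
        refine List.mem_map.mpr ⟨r.toNat, ?_, by rw [Int.toNat_of_nonneg hr0]⟩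
        rw [List.mem_range]; omega
      have hz := h _ hmem
      rw [bne_eq_false_iff_eq] at hz
      rw [pvCountL_getD k array r hr0 hr1]
      unfold pvExpA at hz
      split_ifs with hp
      · rw [if_pos (show pvPair k r = r from hp)] at hz
        rw [PySem.Int.mod_eq_emod_of_pos (by norm_num : (0:Int) < 2)]
        simpa using hz
      · rw [if_neg (show ¬ pvPair k r = r from hp)] at hz
        rw [show PySem.Int.mod (k - r) k = pvPair k r from rfl,
            pvCountL_getD k array _ (pvPair_nonneg k r hk) (pvPair_lt k r hk)]
        simp only [beq_iff_eq]
        omega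
    · intro h v hv
      rw [pvStateA, List.mem_map] at hv
      obtain ⟨i, hi, hval⟩ := hv
      rw [List.mem_range] at hi
      have hr0 : (0:Int) ≤ (i:Int) := by positivity
      have hr1 : (i:Int) < k := by omega
      have hri := h (i:Int) (PySem.List.mem_pyRange_one.mpr ⟨hr0, hr1⟩)
      rw [pvCountL_getD k array _ hr0 hr1] at hri
      rw [bne_eq_false_iff_eq]
      subst hval
      rw [show PySem.Int.mod (k - (i:Int)) k = pvPair k (i:Int) from rfl,
          pvCountL_getD k array _ (pvPair_nonneg k _ hk) (pvPair_lt k _ hk)] at hri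
      unfold pvExpA
      split_ifs at hri ⊢ with hp
      · rw [PySem.Int.mod_eq_emod_of_pos (by norm_num : (0:Int) < 2)] at hri
        simpa using hri
      · simp only [beq_iff_eq] at hri
        omega
  · have harr : array = [] := by
      rcases hpre with h | h
      · omega
      · exact h
    subst harr
    have hkn : k.toNat = 0 := by omega
    simp [hkn, PySem.List.pyRange_one_eq_nil (by omega : k ≤ 0)]
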